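-- pv_equiv track=rewrite | github.com/cirosantilli/project-euler-solutions | solvers/714.py | generate_duodigits_upto
-- ===== SOURCE A (Python) =====
-- def generate_duodigits_upto(max_len: int) -> list[int]:
--     """Generate all duodigits with 1..max_len digits (no leading zeros), sorted."""
--     res: list[int] = []
--
--     for L in range(1, max_len + 1):
--         # repdigits 1..9
--         for d in range(1, 10):
--             res.append(int(str(d) * L))
--
--         # two-digit duodigits: choose a<b, then enumerate all non-trivial patterns
--         for a in range(0, 9):
--             for b in range(a + 1, 10):
--                 if a == 0:
--                     if L == 1:
--                         continue
--                     # leading digit cannot be 0 => MSB must be b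
--                     topbit = 1 << (L - 1)
--                     limit = 1 << (L - 1)
--                     for tail in range(limit):
--                         if tail == limit - 1:
--                             continue  # all b => repdigit
--                         mask = topbit | tail
--                         num = 0
--                         for pos in range(L - 1, -1, -1):
--                             num = num * 10 + (b if (mask >> pos) & 1 else 0)
--                         res.append(num)
--                 else:
--                     limit = 1 << L
--                     for mask in range(1, limit - 1):  # exclude all-a and all-b
--                         num = 0
--                         for pos in range(L - 1, -1, -1):
--                             num = num * 10 + (b if (mask >> pos) & 1 else a)
--                         res.append(num)
--
--     res.sort()
--     return res
-- ===== SOURCE B (Python) =====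
-- from itertools import product
--
--
-- def generate_duodigits_upto(max_len: int) -> list[int]:
--     """Generate all duodigits with 1..max_len digits (no leading zeros), sorted."""
--     seen: set[int] = set()
--     for L in range(1, max_len + 1):
--         for lo in range(10):
--             for hi in range(lo, 10):
--                 for tup in product((lo, hi), repeat=L):
--                     if tup[0] != 0:
--                         n = 0
--                         for d in tup:
--                             n = 10 * n + d
--                         seen.add(n)
--     return sorted(seen)
-- ===== Notes on version B (the rewrite author's own statement) =====
-- stated objective: simpler
-- what changed: Uniform generation: for every length and every (possibly equal) digit pair, enumerate all itertools.product tuples, discard those with an invalid leading digit, and let a set absorb repdigit and cross-pair duplicates, replacing A's separate repdigit loop, its special-cased handling of the pair containing the smallest digit, and its bitmask exclusions.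
import Mathlib
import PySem

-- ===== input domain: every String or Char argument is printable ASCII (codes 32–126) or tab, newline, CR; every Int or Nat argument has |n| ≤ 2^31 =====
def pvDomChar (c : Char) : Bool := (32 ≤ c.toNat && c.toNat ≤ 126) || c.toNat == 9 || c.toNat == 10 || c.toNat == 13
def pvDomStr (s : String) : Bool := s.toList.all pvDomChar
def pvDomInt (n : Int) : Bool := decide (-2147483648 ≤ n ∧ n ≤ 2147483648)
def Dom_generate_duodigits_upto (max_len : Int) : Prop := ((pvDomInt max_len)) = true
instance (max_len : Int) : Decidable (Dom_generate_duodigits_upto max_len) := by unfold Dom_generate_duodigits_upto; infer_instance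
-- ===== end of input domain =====

-- B replaces A's separate repdigit loop, special-cased pair handling and bitmask
-- exclusions by uniform product-tuple generation over every digit pair with a set
-- absorbing the duplicates; objective: simpler (comparable cost).


-- ===== PORT A =====
def generate_duodigits_upto (max_len : Int) : List Int :=
  let res : List Int :=
    (PySem.List.pyRange 1 (max_len + 1) 1).foldl (fun res L =>
      -- repdigits 1..9; int(str(d) * L) ported by hand: the integer whose decimal
      -- digits are L copies of d (exact here since d is a single digit 1..9 and L ≥ 1)
      let res := (PySem.List.pyRange 1 10 1).foldl (fun res d =>
        res ++ [(PySem.List.pyRepeat [d] L).foldl (fun num dd => num * 10 + dd) 0]) res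
      (PySem.List.pyRange 0 9 1).foldl (fun res a =>
        (PySem.List.pyRange (a + 1) 10 1).foldl (fun res b =>
          if a = 0 then
            if L = 1 then res
            else
              let topbit : Int := 1 <<< (L - 1).toNat
              let limit : Int := 1 <<< (L - 1).toNat
              (PySem.List.pyRange 0 limit 1).foldl (fun res tail =>
                if tail = limit - 1 then res
                else
                  let mask := PySem.Int.bor topbit tail
                  let num := (PySem.List.pyRange (L - 1) (-1) (-1)).foldl
                    (fun num pos =>
                      num * 10 + (if PySem.Int.band (mask >>> pos.toNat) 1 ≠ 0 then b else 0)) 0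
                  res ++ [num]) res
          else
            let limit : Int := 1 <<< L.toNat
            (PySem.List.pyRange 1 (limit - 1) 1).foldl (fun res mask =>
              let num := (PySem.List.pyRange (L - 1) (-1) (-1)).foldl
                (fun num pos =>
                  num * 10 + (if PySem.Int.band (mask >>> pos.toNat) 1 ≠ 0 then b else a)) 0
              res ++ [num]) res) res) res) []
  PySem.List.sorted res (fun x => x) false

-- ===== PORT B =====
-- itertools.product(alpha, repeat=n): leftmost position varies slowest
def prodTuples (alpha : List Int) : Nat → List (List Int)
  | 0 => [[]]
  | n + 1 => alpha.flatMap (fun x => (prodTuples alpha n).map (fun rest => x :: rest))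

def generate_duodigits_upto_alt (max_len : Int) : List Int :=
  let seen : PySem.Set Int :=
    (PySem.List.pyRange 1 (max_len + 1) 1).foldl (fun seen L =>
      (PySem.List.pyRange 0 10 1).foldl (fun seen lo =>
        (PySem.List.pyRange lo 10 1).foldl (fun seen hi =>
          (prodTuples [lo, hi] L.toNat).foldl (fun seen tup =>
            if PySem.List.pyGet? tup 0 = some 0 then seen
            else PySem.Set.add seen (tup.foldl (fun n d => 10 * n + d) 0)) seen) seen) seen)
      PySem.Set.empty
  PySem.List.sorted seen (fun x => x) false

-- ===== PRECONDITION & SPEC =====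
def Spec_generate_duodigits_upto (max_len : Int) (out : List Int) : Prop := out = generate_duodigits_upto_alt max_len
instance (max_len : Int) (out : List Int) : Decidable (Spec_generate_duodigits_upto max_len out) := by unfold Spec_generate_duodigits_upto; infer_instance

-- ===== CLAIM (what is proved, stated in full; the proofs are below) =====
def Claim_equal_generate_duodigits_upto : Prop := ∀ (max_len : Int), Dom_generate_duodigits_upto max_len → Spec_generate_duodigits_upto max_len (generate_duodigits_upto max_len)

-- ===== LEMMAS AND PROOFS =====

-- base-`base` value of a digit list, most significant digit first
def valb (base : Int) (ds : List Int) : Int := ds.foldl (fun n d => n * base + d) 0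

-- A's `topbit`/`limit` values (defined as in the port so they are defeq to it)
def topb (L : Int) : Int := ((1 <<< (L - 1).toNat : Nat) : Int)
def limitp (L : Int) : Int := ((1 <<< L.toNat : Nat) : Int)

-- the digit selected by A's inner loop at position `pos`
def dig (a b mask pos : Int) : Int :=
  if PySem.Int.band (mask >>> pos.toNat) 1 ≠ 0 then b else a

-- digit list (most significant first) assembled by A's inner loop
def digL (L a b mask : Int) : List Int :=
  (PySem.List.pyRange (L - 1) (-1) (-1)).map (dig a b mask)

def numOf (L a b mask : Int) : Int := valb 10 (digL L a b mask)

def repL (L d : Int) : Int := valb 10 (List.replicate L.toNat d)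

-- A's list of mask values for the pair (a, b) at length L
def maskList (L a : Int) : List Int :=
  if a = 0 then
    (if L = 1 then [] else
      ((PySem.List.pyRange 0 (topb L) 1).filter
          (fun tail => decide (¬ tail = topb L - 1))).map
        (fun tail => PySem.Int.bor (topb L) tail))
  else PySem.List.pyRange 1 (limitp L - 1) 1

-- the digit lists A produces for one length L (repdigits, then pair blocks)
def blockDL (L : Int) : List (List Int) :=
  (PySem.List.pyRange 1 10 1).map (fun d => List.replicate L.toNat d) ++
  (PySem.List.pyRange 0 9 1).flatMap (fun a =>
    (PySem.List.pyRange (a + 1) 10 1).flatMap (fun b =>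
      (maskList L a).map (digL L a b)))

def dlists (m : Int) : List (List Int) :=
  (PySem.List.pyRange 1 (m + 1) 1).flatMap blockDL

-- the canonical membership predicate: n is a duodigit with at most m digits
def Duo (m n : Int) : Prop :=
  ∃ ds : List Int, ds ≠ [] ∧ (ds.length : Int) ≤ m ∧ ds.head? ≠ some 0 ∧
    (∃ a b : Int, 0 ≤ a ∧ a ≤ b ∧ b ≤ 9 ∧ ∀ x ∈ ds, x = a ∨ x = b) ∧ n = valb 10 ds

-- ---- generic fold lemmas ----

theorem mem_foldl_acc {α : Type} (g : List Int → α → List Int) (C : α → Int → Prop)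
    (hg : ∀ s x n, n ∈ g s x ↔ n ∈ s ∨ C x n) :
    ∀ (l : List α) (s : List Int) (n : Int),
      n ∈ l.foldl g s ↔ n ∈ s ∨ ∃ x ∈ l, C x n := by
  intro l
  induction l with
  | nil => simp
  | cons x t ih =>
    intro s n
    rw [List.foldl_cons, ih, hg]
    constructor
    · rintro ((h | h) | ⟨y, hy, h⟩)
      · exact Or.inl h
      · exact Or.inr ⟨x, by simp, h⟩
      · exact Or.inr ⟨y, by simp [hy], h⟩
    · rintro (h | ⟨y, hy, h⟩)
      · exact Or.inl (Or.inl h)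
      · rcases List.mem_cons.mp hy with h' | h'
        · exact Or.inl (Or.inr (h' ▸ h))
        · exact Or.inr ⟨y, h', h⟩

theorem nodup_foldl_acc {α : Type} (g : List Int → α → List Int)
    (hg : ∀ s x, s.Nodup → (g s x).Nodup) :
    ∀ (l : List α) (s : List Int), s.Nodup → (l.foldl g s).Nodup := by
  intro l
  induction l with
  | nil => intro s hs; simpa using hs
  | cons x t ih => intro s hs; exact ih _ (hg s x hs)

-- ---- valb lemmas ----

theorem valb_foldl_from (base : Int) (ds : List Int) :
    ∀ n : Int, ds.foldl (fun m d => m * base + d) n = n * base ^ ds.length + valb base ds := by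
  induction ds with
  | nil => intro n; simp [valb]
  | cons d t ih =>
    intro n
    simp only [valb, List.foldl_cons, List.length_cons]
    rw [ih, ih]
    ring

theorem valb_nil (base : Int) : valb base [] = 0 := rfl

theorem valb_cons (base d : Int) (t : List Int) :
    valb base (d :: t) = d * base ^ t.length + valb base t := by
  have h : valb base (d :: t) = t.foldl (fun m x => m * base + x) (0 * base + d) := rfl
  rw [h, valb_foldl_from base t]
  ring

theorem valb_append (base : Int) (u v : List Int) :
    valb base (u ++ v) = valb base u * base ^ v.length + valb base v := by
  have h : valb base (u ++ v) = v.foldl (fun m x => m * base + x) (valb base u) := by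
    simp [valb, List.foldl_append]
  rw [h, valb_foldl_from base v]

theorem valb_singleton (base d : Int) : valb base [d] = d := by
  simp [valb]

theorem valb_bounds (base : Int) (ds : List Int)
    (h : ∀ d ∈ ds, 0 ≤ d ∧ d < base) (hb : 0 < base) :
    0 ≤ valb base ds ∧ valb base ds < base ^ ds.length := by
  induction ds with
  | nil => simp [valb]
  | cons d t ih =>
    have hd := h d (by simp)
    have ih' := ih (fun x hx => h x (by simp [hx]))
    have hP : (0:Int) < base ^ t.length := pow_pos hb _
    rw [valb_cons]
    constructor
    · nlinarith [hd.1, ih'.1]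
    · have h1 : d * base ^ t.length ≤ (base - 1) * base ^ t.length := by nlinarith [hd.2]
      have h2 : base ^ (d :: t).length = base * base ^ t.length := by
        rw [List.length_cons, pow_succ]; ring
      rw [h2]; nlinarith [ih'.2]

theorem valb_head_lower (base d : Int) (t : List Int)
    (h : ∀ x ∈ t, 0 ≤ x ∧ x < base) (hb : 0 < base) (hd : 1 ≤ d) :
    base ^ t.length ≤ valb base (d :: t) := by
  have ht := valb_bounds base t h hb
  have hP : (0:Int) < base ^ t.length := pow_pos hb _
  rw [valb_cons]
  nlinarith

theorem valb_inj (base : Int) (hb : 0 < base) :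
    ∀ (ds es : List Int), (∀ d ∈ ds, 0 ≤ d ∧ d < base) → (∀ d ∈ es, 0 ≤ d ∧ d < base) →
      ds.length = es.length → valb base ds = valb base es → ds = es := by
  intro ds
  induction ds with
  | nil =>
    intro es _ _ hlen _
    exact (List.eq_nil_of_length_eq_zero hlen.symm).symm
  | cons d t ih =>
    intro es hds hes hlen hval
    cases es with
    | nil => simp at hlen
    | cons e u =>
      have hlen' : t.length = u.length := by simpa using hlen
      have hbt := valb_bounds base t (fun x hx => hds x (by simp [hx])) hb
      have hbu := valb_bounds base u (fun x hx => hes x (by simp [hx])) hb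
      have hd := hds d (by simp)
      have he := hes e (by simp)
      have hP : (0:Int) < base ^ t.length := pow_pos hb _
      rw [valb_cons, valb_cons, ← hlen'] at hval
      rw [← hlen'] at hbu
      have hde : d = e := by
        rcases lt_trichotomy d e with hlt | heq | hgt
        · have : (d + 1) * base ^ t.length ≤ e * base ^ t.length :=
            mul_le_mul_of_nonneg_right (by omega) (le_of_lt hP)
          nlinarith [hbt.2, hbu.1]
        · exact heq
        · have : (e + 1) * base ^ t.length ≤ d * base ^ t.length :=
            mul_le_mul_of_nonneg_right (by omega) (le_of_lt hP)
          nlinarith [hbu.2, hbt.1]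
      subst hde
      have htu : valb base t = valb base u := by nlinarith
      rw [ih u (fun x hx => hds x (by simp [hx])) (fun x hx => hes x (by simp [hx])) hlen' htu]

theorem valb_full_inj (ds es : List Int)
    (hds : ∀ d ∈ ds, 0 ≤ d ∧ d < 10) (hes : ∀ d ∈ es, 0 ≤ d ∧ d < 10)
    (hd0 : ds ≠ []) (he0 : es ≠ []) (hdh : ds.head? ≠ some 0) (heh : es.head? ≠ some 0)
    (h : valb 10 ds = valb 10 es) : ds = es := by
  cases ds with
  | nil => exact absurd rfl hd0
  | cons d t =>
    cases es with
    | nil => exact absurd rfl he0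
    | cons e u =>
      have hd1 : 1 ≤ d := by
        have := (hds d (by simp)).1
        have : d ≠ 0 := fun h0 => hdh (by simp [h0])
        omega
      have he1 : 1 ≤ e := by
        have := (hes e (by simp)).1
        have : e ≠ 0 := fun h0 => heh (by simp [h0])
        omega
      have hlow_d := valb_head_lower 10 d t (fun x hx => hds x (by simp [hx])) (by norm_num) hd1
      have hlow_e := valb_head_lower 10 e u (fun x hx => hes x (by simp [hx])) (by norm_num) he1
      have hup_d := (valb_bounds 10 (d :: t) hds (by norm_num)).2
      have hup_e := (valb_bounds 10 (e :: u) hes (by norm_num)).2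
      have hlen : t.length = u.length := by
        by_contra hne
        rcases Nat.lt_or_ge t.length u.length with hlt | hge
        · have : (10:Int) ^ (d :: t).length ≤ 10 ^ u.length := by
            apply pow_le_pow_right₀ (by norm_num)
            simpa using hlt
          omega
        · have hlt : u.length < t.length := by omega
          have : (10:Int) ^ (e :: u).length ≤ 10 ^ t.length := by
            apply pow_le_pow_right₀ (by norm_num)
            simpa using hlt
          omega
      exact valb_inj 10 (by norm_num) (d :: t) (e :: u) hds hes (by simpa using hlen) h

theorem valb_eq_zero_iff (base : Int) (ds : List Int)
    (h : ∀ d ∈ ds, 0 ≤ d ∧ d < base) (hb : 0 < base) :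
    valb base ds = 0 ↔ ∀ d ∈ ds, d = 0 := by
  induction ds with
  | nil => simp [valb]
  | cons d t ih =>
    have hd := h d (by simp)
    have ht := fun x hx => h x (List.mem_cons_of_mem _ hx)
    have hbt := valb_bounds base t ht hb
    have hP : (0:Int) < base ^ t.length := pow_pos hb _
    rw [valb_cons]
    constructor
    · intro h0
      have hdz : d = 0 := by nlinarith [hbt.1, hd.1]
      have htz : valb base t = 0 := by nlinarith [hd.1]
      intro x hx
      rcases List.mem_cons.mp hx with rfl | hx'
      · exact hdz
      · exact ((ih ht).mp htz) x hx'
    · intro hall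
      have hdz : d = 0 := hall d (by simp)
      have htz : valb base t = 0 := (ih ht).mpr (fun x hx => hall x (by simp [hx]))
      simp [hdz, htz]

theorem valb2_eq_allones_iff (ds : List Int) (h : ∀ d ∈ ds, d = 0 ∨ d = 1) :
    valb 2 ds = 2 ^ ds.length - 1 ↔ ∀ d ∈ ds, d = 1 := by
  induction ds with
  | nil => simp [valb]
  | cons d t ih =>
    have hd := h d (by simp)
    have ht := fun x hx => h x (List.mem_cons_of_mem _ hx)
    have hbt := valb_bounds 2 t (fun x hx => by rcases ht x hx with rfl | rfl <;> norm_num)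
      (by norm_num)
    have hP : (0:Int) < 2 ^ t.length := pow_pos (by norm_num) _
    have hpow : (2:Int) ^ (d :: t).length = 2 * 2 ^ t.length := by
      rw [List.length_cons, pow_succ]; ring
    rw [valb_cons, hpow]
    constructor
    · intro h0
      have hd1 : d = 1 := by rcases hd with rfl | rfl <;> [nlinarith [hbt.2]; rfl]
      have ht1 : valb 2 t = 2 ^ t.length - 1 := by rw [hd1] at h0; linarith
      intro x hx
      rcases List.mem_cons.mp hx with rfl | hx'
      · exact hd1
      · exact ((ih ht).mp ht1) x hx'
    · intro hall
      have hd1 : d = 1 := hall d (by simp)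
      have ht1 : valb 2 t = 2 ^ t.length - 1 :=
        (ih ht).mpr (fun x hx => hall x (by simp [hx]))
      rw [hd1, ht1]; ring

-- digit extraction from a base-2 value: bit pos of valb 2 mbits
theorem valb2_extract (mbits : List Int) (h : ∀ d ∈ mbits, d = 0 ∨ d = 1)
    (pos : Nat) (hpos : pos < mbits.length) :
    PySem.Int.band (valb 2 mbits >>> pos) 1 =
      mbits[mbits.length - 1 - pos]'(by omega) := by
  have hdig : ∀ d ∈ mbits, 0 ≤ d ∧ d < 2 := by
    intro d hd; rcases h d hd with rfl | rfl <;> norm_num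
  set k : Nat := mbits.length - 1 - pos with hk
  have hklt : k < mbits.length := by omega
  have hsplit : mbits = (mbits.take k ++ [mbits[k]]) ++ mbits.drop (k + 1) := by
    conv_lhs => rw [← List.take_append_drop k mbits]
    rw [List.drop_eq_getElem_cons hklt]
    simp
  have hlen_drop : (mbits.drop (k + 1)).length = pos := by
    simp [List.length_drop]; omega
  have hval : valb 2 mbits =
      valb 2 (mbits.take k ++ [mbits[k]]) * 2 ^ pos + valb 2 (mbits.drop (k + 1)) := by
    conv_lhs => rw [hsplit]
    rw [valb_append, hlen_drop]
  have hdrop_bounds := valb_bounds 2 (mbits.drop (k + 1))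
    (fun x hx => hdig x (List.mem_of_mem_drop hx)) (by norm_num)
  rw [hlen_drop] at hdrop_bounds
  have hshift : valb 2 mbits >>> pos = valb 2 (mbits.take k ++ [mbits[k]]) := by
    rw [Int.shiftRight_eq_div_pow, hval]
    push_cast
    rw [add_comm, Int.add_mul_ediv_right _ _ (by positivity : (2:Int) ^ pos ≠ 0),
      Int.ediv_eq_zero_of_lt hdrop_bounds.1 hdrop_bounds.2, zero_add]
  rw [hshift]
  have hq : valb 2 (mbits.take k ++ [mbits[k]]) = valb 2 (mbits.take k) * 2 + mbits[k] := by
    rw [valb_append]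
    simp [valb_singleton]
  have hbit := h mbits[k] (List.getElem_mem hklt)
  have hband : ∀ x : Int, PySem.Int.band x 1 = PySem.Int.mod x 2 := PySem.Int.band_one
  rw [hq, hband, PySem.Int.mod_eq_emod_of_pos (by norm_num : (0:Int) < 2)]
  rcases hbit with hb0 | hb0 <;> rw [hb0] <;> omega

-- every mask in [0, 2^L) is valb 2 of a 0/1 list of length L
theorem valb2_surj (L : Nat) : ∀ mask : Int, 0 ≤ mask → mask < 2 ^ L →
    ∃ mbits : List Int, mbits.length = L ∧ (∀ d ∈ mbits, d = 0 ∨ d = 1) ∧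
      valb 2 mbits = mask := by
  induction L with
  | zero =>
    intro mask h0 h1
    refine ⟨[], rfl, by simp, by rw [valb_nil]; omega⟩
  | succ n ih =>
    intro mask h0 h1
    obtain ⟨u, hu_len, hu_bits, hu_val⟩ := ih (mask / 2) (by omega) (by
      have : (2:Int) ^ (n + 1) = 2 ^ n * 2 := pow_succ 2 n
      omega)
    refine ⟨u ++ [mask % 2], by simp [hu_len], ?_, ?_⟩
    · intro d hd
      rcases List.mem_append.mp hd with hd' | hd'
      · exact hu_bits d hd'
      · have : d = mask % 2 := by simpa using hd'
        omega
    · rw [valb_append, hu_val, valb_singleton]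
      simp only [List.length_cons, List.length_nil]
      omega

-- ---- digL lemmas ----

theorem digL_eq_map (L a b mask : Int) (hL : 1 ≤ L) (mbits : List Int)
    (hlen : (mbits.length : Int) = L) (hbits : ∀ d ∈ mbits, d = 0 ∨ d = 1)
    (hmask : mask = valb 2 mbits) :
    digL L a b mask = mbits.map (fun c => if c = 1 then b else a) := by
  unfold digL
  rw [PySem.List.pyRange_neg_one]
  have hLt : (L - 1 - (-1)).toNat = mbits.length := by omega
  rw [hLt, List.map_map]
  apply List.ext_getElem (by simp)
  intro i h1 h2
  simp only [List.length_map, List.length_range] at h1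
  simp only [List.getElem_map, List.getElem_range, Function.comp_apply]
  have hpos : (L - 1 - (i : Int)).toNat = mbits.length - 1 - i := by omega
  have hplt : mbits.length - 1 - i < mbits.length := by omega
  have hext := valb2_extract mbits hbits (mbits.length - 1 - i) hplt
  rw [← hmask] at hext
  have hidx : mbits.length - 1 - (mbits.length - 1 - i) = i := by omega
  unfold dig
  rw [hpos, hext]
  have hb' := hbits (mbits[mbits.length - 1 - (mbits.length - 1 - i)]'(by omega))
    (List.getElem_mem _)
  simp only [hidx] at hb' ⊢
  rcases hb' with h0 | h0 <;> simp [h0]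

-- ---- A: flattening the port into dlists ----

theorem rep_fold_eq (L d : Int) :
    (PySem.List.pyRepeat [d] L).foldl (fun num dd => num * 10 + dd) 0 = repL L d := by
  rw [PySem.List.pyRepeat_singleton]; rfl

theorem inner_fold_eq (L a b mask : Int) :
    (PySem.List.pyRange (L - 1) (-1) (-1)).foldl
      (fun num pos => num * 10 + dig a b mask pos) 0 = numOf L a b mask := by
  unfold numOf digL valb
  rw [List.foldl_map]

theorem repLoop_eq (L : Int) (res : List Int) :
    (PySem.List.pyRange 1 10 1).foldl (fun res d =>
      res ++ [(PySem.List.pyRepeat [d] L).foldl (fun num dd => num * 10 + dd) 0]) res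
    = res ++ (PySem.List.pyRange 1 10 1).map (repL L) := by
  rw [PySem.List.foldl_append_singleton_eq_map]
  congr 1
  exact List.map_congr_left (fun d _ => rep_fold_eq L d)

theorem inner_fold_eq' (L b mask : Int) :
    (PySem.List.pyRange (L - 1) (-1) (-1)).foldl
      (fun num pos => num * 10 +
        (if PySem.Int.band (mask >>> ((pos.toNat : Nat) : Int)) 1 ≠ 0 then b else (0 : Int))) 0
    = numOf L 0 b mask := by
  refine Eq.trans (PySem.List.foldl_congr_mem _ _
    (fun num pos => num * 10 + dig 0 b mask pos) 0 ?_) (inner_fold_eq L 0 b mask)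
  intro acc pos _
  unfold dig
  rw [Int.shiftRight_natCast_right]

def blockN (L : Int) : List Int :=
  (PySem.List.pyRange 1 10 1).map (repL L) ++
  (PySem.List.pyRange 0 9 1).flatMap (fun a =>
    (PySem.List.pyRange (a + 1) 10 1).flatMap (fun b =>
      (maskList L a).map (fun mask => numOf L a b mask)))

theorem blockN_eq (L : Int) : blockN L = (blockDL L).map (valb 10) := by
  unfold blockN blockDL
  simp only [List.map_append, List.map_map, List.map_flatMap]
  rfl

set_option maxHeartbeats 1000000 in
theorem araw_eq (m : Int) :
    (PySem.List.pyRange 1 (m + 1) 1).foldl (fun res L =>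
      let res := (PySem.List.pyRange 1 10 1).foldl (fun res d =>
        res ++ [(PySem.List.pyRepeat [d] L).foldl (fun num dd => num * 10 + dd) 0]) res
      (PySem.List.pyRange 0 9 1).foldl (fun res a =>
        (PySem.List.pyRange (a + 1) 10 1).foldl (fun res b =>
          if a = 0 then
            if L = 1 then res
            else
              let topbit : Int := 1 <<< (L - 1).toNat
              let limit : Int := 1 <<< (L - 1).toNat
              (PySem.List.pyRange 0 limit 1).foldl (fun res tail =>
                if tail = limit - 1 then res
                else
                  let mask := PySem.Int.bor topbit tail
                  let num := (PySem.List.pyRange (L - 1) (-1) (-1)).foldl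
                    (fun num pos =>
                      num * 10 + (if PySem.Int.band (mask >>> pos.toNat) 1 ≠ 0 then b else 0)) 0
                  res ++ [num]) res
          else
            let limit : Int := 1 <<< L.toNat
            (PySem.List.pyRange 1 (limit - 1) 1).foldl (fun res mask =>
              let num := (PySem.List.pyRange (L - 1) (-1) (-1)).foldl
                (fun num pos =>
                  num * 10 + (if PySem.Int.band (mask >>> pos.toNat) 1 ≠ 0 then b else a)) 0
              res ++ [num]) res) res) res) [] = (dlists m).map (valb 10) := by
  refine Eq.trans (PySem.List.foldl_congr_mem _ _ (fun acc L => acc ++ blockN L) [] ?_) ?_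
  · intro acc L _
    rw [repLoop_eq]
    refine Eq.trans (PySem.List.foldl_congr_mem _ _ (fun acc a =>
      acc ++ (PySem.List.pyRange (a + 1) 10 1).flatMap (fun b =>
        (maskList L a).map (fun mask => numOf L a b mask))) _ ?_) ?_
    · intro acc2 a _
      refine Eq.trans (PySem.List.foldl_congr_mem _ _ (fun acc b =>
        acc ++ (maskList L a).map (fun mask => numOf L a b mask)) _ ?_) ?_
      · intro acc3 b _
        by_cases ha : a = 0
        · subst ha
          rw [if_pos rfl]
          by_cases hL1 : L = 1
          · rw [if_pos hL1]
            show acc3 = acc3 ++ (maskList L 0).map (fun mask => numOf L 0 b mask)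
            simp [maskList, hL1]
          · rw [if_neg hL1]
            refine Eq.trans (PySem.List.foldl_congr_mem _ _
              (fun acc tail => if ¬ tail = topb L - 1 then
                acc ++ [numOf L 0 b (PySem.Int.bor (topb L) tail)] else acc) acc3 ?_) ?_
            · intro acc4 tail _
              by_cases hx : tail = topb L - 1
              · simp only [topb] at hx ⊢
                simp [hx]
              · simp only [topb] at hx ⊢
                rw [if_neg hx, if_pos hx]
                exact congrArg (fun z => acc4 ++ [z]) (inner_fold_eq' L b _)
            · rw [PySem.List.foldl_append_ite]
              show _ = acc3 ++ (maskList L 0).map (fun mask => numOf L 0 b mask)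
              simp only [maskList, topb, if_neg hL1, if_pos, List.map_map]
              rfl
        · rw [if_neg ha]
          refine Eq.trans (PySem.List.foldl_congr_mem _ _
            (fun acc mask => acc ++ [numOf L a b mask]) acc3 ?_) ?_
          · intro acc4 mask _
            exact congrArg (fun z => acc4 ++ [z]) (inner_fold_eq L a b mask)
          · rw [PySem.List.foldl_append_singleton_eq_map]
            show _ = acc3 ++ (maskList L a).map (fun mask => numOf L a b mask)
            simp only [maskList, limitp, if_neg ha]
      · rw [PySem.List.foldl_append_eq_flatMap]
    · rw [PySem.List.foldl_append_eq_flatMap, List.append_assoc]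
      rfl
  · rw [PySem.List.foldl_append_eq_flatMap]
    unfold dlists
    rw [List.map_flatMap]
    have hfun : blockN = fun a => (blockDL a).map (valb 10) := funext blockN_eq
    rw [hfun]
    simp

-- ---- properties of blockDL members ----

def GoodRep (L : Int) (ds : List Int) : Prop :=
  ∃ d, 1 ≤ d ∧ d ≤ 9 ∧ ds = List.replicate L.toNat d

def GoodPair (L : Int) (ds : List Int) : Prop :=
  ∃ a b, 0 ≤ a ∧ a < b ∧ b ≤ 9 ∧ ds.length = L.toNat ∧ (∀ x ∈ ds, x = a ∨ x = b) ∧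
    a ∈ ds ∧ b ∈ ds ∧ ds.head? ≠ some 0

theorem topb_eq (L : Int) : topb L = (2:Int) ^ (L - 1).toNat := by
  simp [topb, Nat.shiftLeft_eq]

theorem limitp_eq (L : Int) : limitp L = (2:Int) ^ L.toNat := by
  simp [limitp, Nat.shiftLeft_eq]

theorem bor_topb_add (L tail : Int) (h0 : 0 ≤ tail) (h1 : tail < topb L) :
    PySem.Int.bor (topb L) tail = topb L + tail := by
  have hk : topb L = ((2 ^ (L - 1).toNat : Nat) : Int) := by
    rw [topb_eq]; push_cast; ring
  have ht' : tail = ((tail.toNat : Nat) : Int) := by omega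
  rw [hk] at h1 ⊢
  rw [ht']
  rw [PySem.Int.bor_natCast]
  have hlt : tail.toNat < 2 ^ (L - 1).toNat := by omega
  have hor' : (2:Nat) ^ (L - 1).toNat ||| tail.toNat
      = 2 ^ (L - 1).toNat + tail.toNat := by
    have := Nat.two_pow_add_eq_or_of_lt hlt 1
    simpa using this.symm
  rw [hor']
  push_cast
  ring

theorem mem_maskList_pos (L a mask : Int) (ha : ¬ a = 0) :
    mask ∈ maskList L a ↔ 1 ≤ mask ∧ mask < 2 ^ L.toNat - 1 := by
  unfold maskList
  rw [if_neg ha, PySem.List.mem_pyRange_one, limitp_eq]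

theorem mem_maskList_zero (L mask : Int) (hL : 1 ≤ L) (hL1 : ¬ L = 1) :
    mask ∈ maskList L 0 ↔
      2 ^ (L.toNat - 1) ≤ mask ∧ mask < 2 ^ L.toNat ∧ mask ≠ 2 ^ L.toNat - 1 := by
  have hexp : (L - 1).toNat = L.toNat - 1 := by omega
  have hsplit : (2:Int) ^ L.toNat = 2 * 2 ^ (L.toNat - 1) := by
    rw [← pow_succ']
    congr 1
    omega
  unfold maskList
  rw [if_pos rfl, if_neg hL1]
  simp only [List.mem_map, List.mem_filter]
  constructor
  · rintro ⟨tail, ⟨htail, hne⟩, rfl⟩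
    rw [PySem.List.mem_pyRange_one] at htail
    rw [bor_topb_add L tail htail.1 htail.2]
    rw [topb_eq, hexp] at htail hne ⊢
    simp only [decide_not, Bool.not_eq_eq_eq_not, Bool.not_true, decide_eq_false_iff_not] at hne
    refine ⟨by omega, by omega, by omega⟩
  · rintro ⟨h1, h2, h3⟩
    refine ⟨mask - 2 ^ (L.toNat - 1), ⟨?_, ?_⟩, ?_⟩
    · rw [PySem.List.mem_pyRange_one, topb_eq, hexp]
      omega
    · simp only [decide_not, Bool.not_eq_eq_eq_not, Bool.not_true, decide_eq_false_iff_not]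
      rw [topb_eq, hexp]
      omega
    · rw [bor_topb_add L _ (by linarith) (by rw [topb_eq, hexp]; linarith)]
      rw [topb_eq, hexp]
      ring

theorem mask_bounds_of_mem (L a mask : Int) (hL : 1 ≤ L) (hm : mask ∈ maskList L a) :
    1 ≤ mask ∧ mask < 2 ^ L.toNat ∧ mask ≠ 2 ^ L.toNat - 1 := by
  by_cases ha : a = 0
  · subst ha
    by_cases hL1 : L = 1
    · rw [maskList, if_pos rfl, if_pos hL1] at hm
      simp at hm
    · have h := (mem_maskList_zero L mask hL hL1).mp hm
      have hpow : (1:Int) ≤ 2 ^ (L.toNat - 1) := one_le_pow₀ (by norm_num)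
      exact ⟨by omega, h.2.1, h.2.2⟩
  · have h := (mem_maskList_pos L a mask ha).mp hm
    exact ⟨h.1, by omega, by omega⟩

theorem nodup_maskList (L a : Int) : (maskList L a).Nodup := by
  by_cases ha : a = 0
  · subst ha
    rw [maskList, if_pos rfl]
    by_cases hL1 : L = 1
    · simp [hL1]
    · rw [if_neg hL1]
      refine List.Nodup.map_on ?_ (List.Nodup.filter _ (PySem.List.nodup_pyRange_one 0 _))
      intro x hx y hy hxy
      rw [List.mem_filter, PySem.List.mem_pyRange_one] at hx hy
      rw [bor_topb_add L x hx.1.1 hx.1.2, bor_topb_add L y hy.1.1 hy.1.2] at hxy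
      omega
  · rw [maskList, if_neg ha]
    exact PySem.List.nodup_pyRange_one _ _

-- all the GoodPair data for a digit list generated from a mask
theorem digL_good (L a b mask : Int) (hL : 1 ≤ L) (ha : 0 ≤ a) (hab : a < b)
    (hm : mask ∈ maskList L a) :
    (digL L a b mask).length = L.toNat ∧ (∀ x ∈ digL L a b mask, x = a ∨ x = b) ∧
      a ∈ digL L a b mask ∧ b ∈ digL L a b mask ∧ (digL L a b mask).head? ≠ some 0 := by
  obtain ⟨hm1, hm2, hm3⟩ := mask_bounds_of_mem L a mask hL hm
  obtain ⟨mbits, hblen, hbits, hbval⟩ := valb2_surj L.toNat mask (by omega) hm2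
  have hlen' : (mbits.length : Int) = L := by omega
  have hmap := digL_eq_map L a b mask hL mbits hlen' hbits hbval.symm
  have hbits01 : ∀ d ∈ mbits, 0 ≤ d ∧ d < 2 := by
    intro d hd; rcases hbits d hd with rfl | rfl <;> norm_num
  refine ⟨by rw [hmap]; simp [hblen], ?_, ?_, ?_, ?_⟩
  · intro x hx
    rw [hmap] at hx
    obtain ⟨c, hc, rfl⟩ := List.mem_map.mp hx
    by_cases hc1 : c = 1 <;> simp [hc1]
  · -- a occurs: mask is not all ones
    have hnot : ¬ ∀ d ∈ mbits, d = 1 := by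
      intro hall
      exact hm3 (by rw [← hbval, (valb2_eq_allones_iff mbits hbits).mpr hall, hblen])
    push_neg at hnot
    obtain ⟨c, hc, hc1⟩ := hnot
    rw [hmap]
    exact List.mem_map.mpr ⟨c, hc, by simp [hc1]⟩
  · -- b occurs: mask is not zero
    have hnot : ¬ ∀ d ∈ mbits, d = 0 := by
      intro hall
      have : valb 2 mbits = 0 := (valb_eq_zero_iff 2 mbits hbits01 (by norm_num)).mpr hall
      omega
    push_neg at hnot
    obtain ⟨c, hc, hc0⟩ := hnot
    have hc1 : c = 1 := by
      rcases hbits c hc with rfl | rfl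
      · exact absurd rfl hc0
      · rfl
    rw [hmap]
    exact List.mem_map.mpr ⟨c, hc, by simp [hc1]⟩
  · -- leading digit is not 0
    cases mbits with
    | nil => simp at hblen; omega
    | cons c rest =>
      rw [hmap]
      simp only [List.map_cons, List.head?_cons, ne_eq, Option.some_inj]
      by_cases ha0 : a = 0
      · -- head must be b: the top bit of the mask is set
        subst ha0
        have hL1 : ¬ L = 1 := by
          intro h1
          rw [maskList, if_pos rfl, if_pos h1] at hm
          simp at hm
        have hz := (mem_maskList_zero L mask hL hL1).mp hm
        have hrb := valb_bounds 2 rest (fun x hx => hbits01 x (by simp [hx])) (by norm_num)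
        rw [valb_cons] at hbval
        have hrl : rest.length = L.toNat - 1 := by simp at hblen; omega
        rw [hrl] at hbval hrb
        have hc1 : c = 1 := by
          rcases hbits c (by simp) with rfl | rfl
          · exfalso; omega
          · rfl
        simp [hc1]
        omega
      · by_cases hc1 : c = 1 <;> simp [hc1] <;> omega

theorem digL_inj (L a b : Int) (hL : 1 ≤ L) (hab : a ≠ b) (m1 m2 : Int)
    (h01 : 0 ≤ m1) (h11 : m1 < 2 ^ L.toNat) (h02 : 0 ≤ m2) (h12 : m2 < 2 ^ L.toNat)
    (heq : digL L a b m1 = digL L a b m2) : m1 = m2 := by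
  obtain ⟨u, hul, hub, huv⟩ := valb2_surj L.toNat m1 h01 h11
  obtain ⟨v, hvl, hvb, hvv⟩ := valb2_surj L.toNat m2 h02 h12
  rw [digL_eq_map L a b m1 hL u (by omega) hub huv.symm,
    digL_eq_map L a b m2 hL v (by omega) hvb hvv.symm] at heq
  have huv' : u = v := by
    apply List.ext_getElem (by omega)
    intro i hi1 hi2
    have := congrArg (fun l => l[i]?) heq
    simp only [List.getElem?_map] at this
    rw [List.getElem?_eq_getElem hi1, List.getElem?_eq_getElem hi2] at this
    simp only [Option.map_some, Option.some_inj] at this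
    rcases hub u[i] (List.getElem_mem hi1) with h1 | h1 <;>
      rcases hvb v[i] (List.getElem_mem hi2) with h2 | h2 <;>
        simp [h1, h2] at this ⊢ <;>
          first
            | exact (hab this).elim
            | exact (hab this.symm).elim
  rw [← huv, ← hvv, huv']

theorem digL_surj (L a b : Int) (hL : 1 ≤ L) (ds : List Int) (ha : 0 ≤ a) (hab : a < b)
    (hlen : ds.length = L.toNat) (halpha : ∀ x ∈ ds, x = a ∨ x = b)
    (hain : a ∈ ds) (hbin : b ∈ ds) (hh : ds.head? ≠ some 0) :
    ∃ mask ∈ maskList L a, digL L a b mask = ds := by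
  set mbits : List Int := ds.map (fun x => if x = b then (1:Int) else 0) with hmb
  have hblen : mbits.length = L.toNat := by simp [hmb, hlen]
  have hbits : ∀ d ∈ mbits, d = 0 ∨ d = 1 := by
    intro d hd
    obtain ⟨x, _, rfl⟩ := List.mem_map.mp hd
    by_cases hx : x = b <;> simp [hx]
  have hbits01 : ∀ d ∈ mbits, 0 ≤ d ∧ d < 2 := by
    intro d hd; rcases hbits d hd with rfl | rfl <;> norm_num
  set mask : Int := valb 2 mbits with hmask
  have hbnd := valb_bounds 2 mbits hbits01 (by norm_num)
  rw [hblen] at hbnd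
  have hmap : digL L a b mask = ds := by
    rw [digL_eq_map L a b mask hL mbits (by omega) hbits rfl, hmb, List.map_map]
    refine List.map_congr_left ?_ |>.trans (List.map_id ds)
    intro x hx
    rcases halpha x hx with rfl | rfl
    · have : ¬ (x = b) := by omega
      simp [Function.comp, this]
    · simp [Function.comp]
  -- b occurs, so some bit is 1, so mask ≠ 0
  have hmask_ne0 : mask ≠ 0 := by
    intro h0
    have hall := (valb_eq_zero_iff 2 mbits hbits01 (by norm_num)).mp h0
    have : (1:Int) = 0 := hall 1 (List.mem_map.mpr ⟨b, hbin, by simp⟩)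
    norm_num at this
  -- a occurs, so some bit is 0, so mask ≠ 2^L - 1
  have hmask_ne_all : mask ≠ 2 ^ L.toNat - 1 := by
    intro h1
    have hall := (valb2_eq_allones_iff mbits hbits).mp (by rw [hblen]; exact h1)
    have h0 : (0:Int) = 1 := hall 0 (List.mem_map.mpr ⟨a, hain, by simp [show ¬ a = b by omega]⟩)
    norm_num at h0
  refine ⟨mask, ?_, hmap⟩
  by_cases ha0 : a = 0
  · subst ha0
    have hL1 : ¬ L = 1 := by
      intro h1
      rw [h1] at hlen
      cases ds with
      | nil => simp at hlen
      | cons x rest =>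
        simp at hlen
        subst hlen
        simp at hain hbin
        omega
    rw [mem_maskList_zero L mask hL hL1]
    refine ⟨?_, hbnd.2, hmask_ne_all⟩
    -- head of ds is b, so the top bit is set
    cases ds with
    | nil => simp at hain
    | cons x rest =>
      have hx : x = b := by
        rcases halpha x (by simp) with h | h
        · exact absurd (by simp [h]) hh
        · exact h
      have hmb' : mbits = 1 :: rest.map (fun y => if y = b then (1:Int) else 0) := by
        simp [hmb, hx]
      rw [hmask, hmb', valb_cons]
      have hrb := valb_bounds 2 (rest.map (fun y => if y = b then (1:Int) else 0))
        (fun z hz => hbits01 z (by rw [hmb']; simp [hz])) (by norm_num)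
      have hrl : (rest.map (fun y => if y = b then (1:Int) else 0)).length = L.toNat - 1 := by
        simp at hlen ⊢
        omega
      rw [hrl]
      rw [hrl] at hrb
      linarith [hrb.1]
  · rw [mem_maskList_pos L a mask ha0]
    constructor <;> omega

theorem mem_blockDL (L : Int) (hL : 1 ≤ L) (ds : List Int) :
    ds ∈ blockDL L ↔ GoodRep L ds ∨ GoodPair L ds := by
  unfold blockDL
  rw [List.mem_append]
  constructor
  · rintro (h | h)
    · obtain ⟨d, hd, rfl⟩ := List.mem_map.mp h
      rw [PySem.List.mem_pyRange_one] at hd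
      exact Or.inl ⟨d, by omega, by omega, rfl⟩
    · right
      obtain ⟨a, ha, h⟩ := List.mem_flatMap.mp h
      obtain ⟨b, hb, h⟩ := List.mem_flatMap.mp h
      obtain ⟨mask, hm, rfl⟩ := List.mem_map.mp h
      rw [PySem.List.mem_pyRange_one] at ha hb
      obtain ⟨h1, h2, h3, h4, h5⟩ := digL_good L a b mask hL (by omega) (by omega) hm
      exact ⟨a, b, by omega, by omega, by omega, h1, h2, h3, h4, h5⟩
  · rintro (⟨d, hd1, hd9, rfl⟩ | ⟨a, b, ha, hab, hb, hlen, halpha, hain, hbin, hh⟩)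
    · exact Or.inl (List.mem_map.mpr ⟨d, by rw [PySem.List.mem_pyRange_one]; omega, rfl⟩)
    · right
      obtain ⟨mask, hm, hds⟩ := digL_surj L a b hL ds ha hab hlen halpha hain hbin hh
      refine List.mem_flatMap.mpr ⟨a, by rw [PySem.List.mem_pyRange_one]; omega, ?_⟩
      refine List.mem_flatMap.mpr ⟨b, by rw [PySem.List.mem_pyRange_one]; omega, ?_⟩
      exact List.mem_map.mpr ⟨mask, hm, hds⟩

-- two strict pairs with a common witness list are equal
theorem pair_distinct (a b a' b' : Int) (hab : a < b) (hab' : a' < b')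
    (ds : List Int) (h1 : ∀ x ∈ ds, x = a ∨ x = b) (hain : a ∈ ds) (hbin : b ∈ ds)
    (h1' : ∀ x ∈ ds, x = a' ∨ x = b') (hain' : a' ∈ ds) (hbin' : b' ∈ ds) :
    a = a' ∧ b = b' := by
  have c1 := h1 a' hain'
  have c2 := h1 b' hbin'
  have c3 := h1' a hain
  have c4 := h1' b hbin
  omega

theorem mem_pairImage (L a b : Int) (hL : 1 ≤ L) (ha : 0 ≤ a) (hab : a < b) (ds : List Int)
    (h : ds ∈ (maskList L a).map (digL L a b)) :
    (∀ x ∈ ds, x = a ∨ x = b) ∧ a ∈ ds ∧ b ∈ ds ∧ ds.length = L.toNat ∧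
      ds.head? ≠ some 0 := by
  obtain ⟨mask, hm, rfl⟩ := List.mem_map.mp h
  obtain ⟨h1, h2, h3, h4, h5⟩ := digL_good L a b mask hL ha hab hm
  exact ⟨h2, h3, h4, h1, h5⟩

theorem nodup_blockDL (L : Int) (hL : 1 ≤ L) : (blockDL L).Nodup := by
  unfold blockDL
  refine List.Nodup.append ?_ ?_ ?_
  · refine List.Nodup.map_on ?_ (PySem.List.nodup_pyRange_one _ _)
    intro x _ y _ hxy
    exact List.replicate_right_injective (by omega : L.toNat ≠ 0) hxy
  · rw [List.nodup_flatMap]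
    constructor
    · intro a hamem
      rw [PySem.List.mem_pyRange_one] at hamem
      rw [List.nodup_flatMap]
      constructor
      · intro b hbmem
        rw [PySem.List.mem_pyRange_one] at hbmem
        refine List.Nodup.map_on ?_ (nodup_maskList L a)
        intro x hx y hy hxy
        obtain ⟨hx1, hx2, _⟩ := mask_bounds_of_mem L a x hL hx
        obtain ⟨hy1, hy2, _⟩ := mask_bounds_of_mem L a y hL hy
        exact digL_inj L a b hL (by omega) x y (by omega) hx2 (by omega) hy2 hxy
      · refine List.Pairwise.imp_of_mem ?_ (PySem.List.pairwise_lt_pyRange_one _ _)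
        intro b1 b2 hb1 hb2 hlt ds hm1 hm2
        rw [PySem.List.mem_pyRange_one] at hb1 hb2
        obtain ⟨p1, p2, p3, _, _⟩ := mem_pairImage L a b1 hL (by omega) (by omega) ds hm1
        obtain ⟨q1, q2, q3, _, _⟩ := mem_pairImage L a b2 hL (by omega) (by omega) ds hm2
        have := pair_distinct a b1 a b2 (by omega) (by omega) ds p1 p2 p3 q1 q2 q3
        omega
    · refine List.Pairwise.imp_of_mem ?_ (PySem.List.pairwise_lt_pyRange_one _ _)
      intro a1 a2 ha1 ha2 hlt ds hm1 hm2
      rw [PySem.List.mem_pyRange_one] at ha1 ha2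
      obtain ⟨b1, hb1, hm1'⟩ := List.mem_flatMap.mp hm1
      obtain ⟨b2, hb2, hm2'⟩ := List.mem_flatMap.mp hm2
      rw [PySem.List.mem_pyRange_one] at hb1 hb2
      obtain ⟨p1, p2, p3, _, _⟩ := mem_pairImage L a1 b1 hL (by omega) (by omega) ds hm1'
      obtain ⟨q1, q2, q3, _, _⟩ := mem_pairImage L a2 b2 hL (by omega) (by omega) ds hm2'
      have := pair_distinct a1 b1 a2 b2 (by omega) (by omega) ds p1 p2 p3 q1 q2 q3
      omega
  · intro ds hds hds'
    obtain ⟨d, hd, rfl⟩ := List.mem_map.mp hds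
    rw [PySem.List.mem_pyRange_one] at hd
    obtain ⟨a, hamem, h⟩ := List.mem_flatMap.mp hds'
    obtain ⟨b, hbmem, h'⟩ := List.mem_flatMap.mp h
    rw [PySem.List.mem_pyRange_one] at hamem hbmem
    obtain ⟨p1, p2, p3, _, _⟩ := mem_pairImage L a b hL (by omega) (by omega) _ h'
    have ha' : a = d := List.eq_of_mem_replicate p2
    have hb' : b = d := List.eq_of_mem_replicate p3
    omega

theorem length_of_mem_blockDL (L : Int) (hL : 1 ≤ L) (ds : List Int)
    (h : ds ∈ blockDL L) : ds.length = L.toNat := by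
  rcases (mem_blockDL L hL ds).mp h with ⟨d, _, _, rfl⟩ | ⟨a, b, _, _, _, hlen, _⟩
  · simp
  · exact hlen

theorem good_of_mem_blockDL (L : Int) (hL : 1 ≤ L) (ds : List Int) (h : ds ∈ blockDL L) :
    ds ≠ [] ∧ ds.head? ≠ some 0 ∧ (∀ d ∈ ds, 0 ≤ d ∧ d < 10) ∧
      (∃ a b : Int, 0 ≤ a ∧ a ≤ b ∧ b ≤ 9 ∧ ∀ x ∈ ds, x = a ∨ x = b) := by
  rcases (mem_blockDL L hL ds).mp h with ⟨d, hd1, hd9, rfl⟩ | hp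
  · refine ⟨List.ne_nil_of_length_pos (by simp; omega), ?_, ?_, d, d, by omega, le_refl d,
      by omega, ?_⟩
    · rw [List.head?_replicate]
      simp only [ne_eq]
      split_ifs with h0
      · simp
      · simp; omega
    · intro x hx
      have := List.eq_of_mem_replicate hx
      omega
    · intro x hx
      exact Or.inl (List.eq_of_mem_replicate hx)
  · obtain ⟨a, b, ha, hab, hb, hlen, halpha, hain, hbin, hh⟩ := hp
    refine ⟨List.ne_nil_of_length_pos (by omega), hh, ?_, a, b, ha, by omega, hb, halpha⟩
    intro x hx
    rcases halpha x hx with rfl | rfl <;> omega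

theorem nodup_dlists (m : Int) : (dlists m).Nodup := by
  unfold dlists
  rw [List.nodup_flatMap]
  constructor
  · intro L hLmem
    rw [PySem.List.mem_pyRange_one] at hLmem
    exact nodup_blockDL L (by omega)
  · refine List.Pairwise.imp_of_mem ?_ (PySem.List.pairwise_lt_pyRange_one _ _)
    intro L1 L2 hL1 hL2 hlt ds hm1 hm2
    rw [PySem.List.mem_pyRange_one] at hL1 hL2
    have h1 := length_of_mem_blockDL L1 (by omega) ds hm1
    have h2 := length_of_mem_blockDL L2 (by omega) ds hm2
    omega

theorem mem_map_dlists (m n : Int) : n ∈ (dlists m).map (valb 10) ↔ Duo m n := by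
  rw [List.mem_map]
  constructor
  · rintro ⟨ds, hds, rfl⟩
    obtain ⟨L, hLmem, hblock⟩ := List.mem_flatMap.mp hds
    rw [PySem.List.mem_pyRange_one] at hLmem
    obtain ⟨hne, hh, hdig, halpha⟩ := good_of_mem_blockDL L (by omega) ds hblock
    have hlen := length_of_mem_blockDL L (by omega) ds hblock
    exact ⟨ds, hne, by omega, hh, halpha, rfl⟩
  · rintro ⟨ds, hne, hlenm, hh, ⟨a0, b0, ha0, hab0, hb0, halpha⟩, rfl⟩
    refine ⟨ds, ?_, rfl⟩
    unfold dlists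
    have hpos : 0 < ds.length := List.length_pos_iff.mpr hne
    refine List.mem_flatMap.mpr ⟨(ds.length : Int),
      by rw [PySem.List.mem_pyRange_one]; omega, ?_⟩
    refine (mem_blockDL _ (by omega) ds).mpr ?_
    cases ds with
    | nil => exact absurd rfl hne
    | cons c t =>
      have hc := halpha c (by simp)
      have hc0 : ¬ c = 0 := fun h0 => hh (by simp [h0])
      by_cases hconst : ∀ x ∈ t, x = c
      · left
        refine ⟨c, by omega, by omega, ?_⟩
        rw [List.eq_replicate_iff]
        refine ⟨by simp, ?_⟩
        intro x hx
        rcases List.mem_cons.mp hx with rfl | hx'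
        · rfl
        · exact hconst x hx'
      · right
        push_neg at hconst
        obtain ⟨y, hy, hyc⟩ := hconst
        have hyv := halpha y (by simp [hy])
        have hne0 : a0 ≠ b0 := by
          rcases hc with rfl | rfl <;> rcases hyv with rfl | rfl <;> omega
        have haain : a0 ∈ c :: t := by
          rcases hc with hc' | hc'
          · rw [← hc']; simp
          · rcases hyv with hy' | hy'
            · rw [← hy']; simp [hy]
            · omega
        have hbbin : b0 ∈ c :: t := by
          rcases hc with hc' | hc'
          · rcases hyv with hy' | hy'
            · omega
            · rw [← hy']; simp [hy]
          · rw [← hc']; simp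
        exact ⟨a0, b0, ha0, by omega, hb0, by simp, halpha, haain, hbbin, hh⟩

theorem nodup_map_dlists (m : Int) : ((dlists m).map (valb 10)).Nodup := by
  refine List.Nodup.map_on ?_ (nodup_dlists m)
  intro x hx y hy hxy
  obtain ⟨L1, hL1, hb1⟩ := List.mem_flatMap.mp hx
  obtain ⟨L2, hL2, hb2⟩ := List.mem_flatMap.mp hy
  rw [PySem.List.mem_pyRange_one] at hL1 hL2
  obtain ⟨hne1, hh1, hdig1, _⟩ := good_of_mem_blockDL L1 (by omega) x hb1
  obtain ⟨hne2, hh2, hdig2, _⟩ := good_of_mem_blockDL L2 (by omega) y hb2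
  exact valb_full_inj x y hdig1 hdig2 hne1 hne2 hh1 hh2 hxy

-- ---- B side ----

theorem mem_prodTuples (alpha : List Int) : ∀ (n : Nat) (tup : List Int),
    tup ∈ prodTuples alpha n ↔ tup.length = n ∧ ∀ x ∈ tup, x ∈ alpha := by
  intro n
  induction n with
  | zero =>
    intro tup
    simp only [prodTuples, List.mem_singleton]
    constructor
    · rintro rfl; simp
    · rintro ⟨hlen, _⟩; exact List.eq_nil_of_length_eq_zero hlen
  | succ k ih =>
    intro tup
    simp only [prodTuples, List.mem_flatMap, List.mem_map]
    constructor
    · rintro ⟨x, hx, rest, hrest, rfl⟩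
      obtain ⟨hlen, hmem⟩ := (ih rest).mp hrest
      refine ⟨by simp [hlen], ?_⟩
      intro y hy
      rcases List.mem_cons.mp hy with rfl | hy'
      · exact hx
      · exact hmem y hy'
    · rintro ⟨hlen, hmem⟩
      cases tup with
      | nil => simp at hlen
      | cons x rest =>
        refine ⟨x, hmem x (by simp), rest, (ih rest).mpr ⟨by simpa using hlen, ?_⟩, rfl⟩
        exact fun y hy => hmem y (by simp [hy])

theorem pyGet?_zero {α : Type} (xs : List α) : PySem.List.pyGet? xs 0 = xs.head? := by
  cases xs <;> simp [PySem.List.pyGet?, PySem.List.pyIdx?]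

theorem foldl_swap10 (l : List Int) (init : Int) :
    l.foldl (fun n d => 10 * n + d) init = l.foldl (fun n d => n * 10 + d) init :=
  PySem.List.foldl_congr_mem _ _ _ init (by intro acc x _; ring)

theorem mem_seen (m n : Int) :
    n ∈ (PySem.List.pyRange 1 (m + 1) 1).foldl (fun seen L =>
      (PySem.List.pyRange 0 10 1).foldl (fun seen lo =>
        (PySem.List.pyRange lo 10 1).foldl (fun seen hi =>
          (prodTuples [lo, hi] L.toNat).foldl (fun seen tup =>
            if PySem.List.pyGet? tup 0 = some 0 then seen
            else PySem.Set.add seen (tup.foldl (fun n d => 10 * n + d) 0)) seen) seen) seen)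
      PySem.Set.empty ↔ Duo m n := by
  have h2 : ∀ (s : List Int) (L lo hi n : Int),
      n ∈ (prodTuples [lo, hi] L.toNat).foldl (fun seen tup =>
        if PySem.List.pyGet? tup 0 = some 0 then seen
        else PySem.Set.add seen (tup.foldl (fun n d => 10 * n + d) 0)) s ↔
      n ∈ s ∨ ∃ tup ∈ prodTuples [lo, hi] L.toNat,
        ¬ PySem.List.pyGet? tup 0 = some 0 ∧ n = tup.foldl (fun n d => 10 * n + d) 0 := by
    intro s L lo hi n
    refine mem_foldl_acc _ (fun tup x => ¬ PySem.List.pyGet? tup 0 = some 0 ∧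
      x = tup.foldl (fun n d => 10 * n + d) 0) ?_ _ s n
    intro s' tup x
    by_cases h : PySem.List.pyGet? tup 0 = some 0
    · simp [h]
    · simp [h, PySem.Set.mem_add]
  have h3 : ∀ (s : List Int) (L lo n : Int),
      n ∈ (PySem.List.pyRange lo 10 1).foldl (fun seen hi =>
        (prodTuples [lo, hi] L.toNat).foldl (fun seen tup =>
          if PySem.List.pyGet? tup 0 = some 0 then seen
          else PySem.Set.add seen (tup.foldl (fun n d => 10 * n + d) 0)) seen) s ↔
      n ∈ s ∨ ∃ hi ∈ PySem.List.pyRange lo 10 1, ∃ tup ∈ prodTuples [lo, hi] L.toNat,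
        ¬ PySem.List.pyGet? tup 0 = some 0 ∧ n = tup.foldl (fun n d => 10 * n + d) 0 := by
    intro s L lo n
    refine mem_foldl_acc _ (fun hi x => ∃ tup ∈ prodTuples [lo, hi] L.toNat,
      ¬ PySem.List.pyGet? tup 0 = some 0 ∧ x = tup.foldl (fun n d => 10 * n + d) 0) ?_ _ s n
    intro s' hi x
    rw [h2 s' L lo hi x]
  have h4 : ∀ (s : List Int) (L n : Int),
      n ∈ (PySem.List.pyRange 0 10 1).foldl (fun seen lo =>
        (PySem.List.pyRange lo 10 1).foldl (fun seen hi =>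
          (prodTuples [lo, hi] L.toNat).foldl (fun seen tup =>
            if PySem.List.pyGet? tup 0 = some 0 then seen
            else PySem.Set.add seen (tup.foldl (fun n d => 10 * n + d) 0)) seen) seen) s ↔
      n ∈ s ∨ ∃ lo ∈ PySem.List.pyRange 0 10 1, ∃ hi ∈ PySem.List.pyRange lo 10 1,
        ∃ tup ∈ prodTuples [lo, hi] L.toNat,
          ¬ PySem.List.pyGet? tup 0 = some 0 ∧ n = tup.foldl (fun n d => 10 * n + d) 0 := by
    intro s L n
    refine mem_foldl_acc _ (fun lo x => ∃ hi ∈ PySem.List.pyRange lo 10 1,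
      ∃ tup ∈ prodTuples [lo, hi] L.toNat,
        ¬ PySem.List.pyGet? tup 0 = some 0 ∧ x = tup.foldl (fun n d => 10 * n + d) 0) ?_ _ s n
    intro s' lo x
    rw [h3 s' L lo x]
  rw [mem_foldl_acc _ (fun L n => ∃ lo ∈ PySem.List.pyRange 0 10 1,
      ∃ hi ∈ PySem.List.pyRange lo 10 1, ∃ tup ∈ prodTuples [lo, hi] L.toNat,
        ¬ PySem.List.pyGet? tup 0 = some 0 ∧ n = tup.foldl (fun n d => 10 * n + d) 0)
    (fun s' L x => h4 s' L x) _ PySem.Set.empty n]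
  have hempty : (n ∈ (PySem.Set.empty : PySem.Set Int)) = False := by
    simp [PySem.Set.empty]
  rw [hempty]
  constructor
  · rintro (hfalse | ⟨L, hL, lo, hlo, hi, hhi, tup, htup, hhead, rfl⟩)
    · exact hfalse.elim
    · rw [PySem.List.mem_pyRange_one] at hL hlo hhi
      obtain ⟨hlen, hmem⟩ := (mem_prodTuples _ _ _).mp htup
      refine ⟨tup, ?_, ?_, ?_, ⟨lo, hi, ?_, ?_, ?_, ?_⟩, ?_⟩
      · intro hnil; rw [hnil] at hlen; simp at hlen; omega
      · rw [hlen]; omega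
      · rw [pyGet?_zero] at hhead; exact hhead
      · omega
      · omega
      · omega
      · intro x hx; have := hmem x hx; simpa using this
      · rw [foldl_swap10]; rfl
  · rintro ⟨ds, hne, hlen, hh, ⟨a, b2, ha0, hab, hb9, halpha⟩, rfl⟩
    right
    have hpos : 0 < ds.length := List.length_pos_iff.mpr hne
    refine ⟨(ds.length : Int), ?_, a, ?_, b2, ?_, ds, ?_, ?_, ?_⟩
    · rw [PySem.List.mem_pyRange_one]; omega
    · rw [PySem.List.mem_pyRange_one]; omega
    · rw [PySem.List.mem_pyRange_one]; omega
    · refine (mem_prodTuples _ _ _).mpr ⟨by simp, ?_⟩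
      intro x hx; have := halpha x hx; simp; tauto
    · rw [pyGet?_zero]; exact hh
    · rw [foldl_swap10]; rfl

theorem nodup_seen (m : Int) :
    ((PySem.List.pyRange 1 (m + 1) 1).foldl (fun seen L =>
      (PySem.List.pyRange 0 10 1).foldl (fun seen lo =>
        (PySem.List.pyRange lo 10 1).foldl (fun seen hi =>
          (prodTuples [lo, hi] L.toNat).foldl (fun seen tup =>
            if PySem.List.pyGet? tup 0 = some 0 then seen
            else PySem.Set.add seen (tup.foldl (fun n d => 10 * n + d) 0)) seen) seen) seen)
      (PySem.Set.empty : PySem.Set Int)).Nodup := by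
  refine nodup_foldl_acc _ ?_ _ _ (by simp [PySem.Set.empty])
  intro s L hs
  refine nodup_foldl_acc _ ?_ _ _ hs
  intro s' lo hs'
  refine nodup_foldl_acc _ ?_ _ _ hs'
  intro s'' hi hs''
  refine nodup_foldl_acc _ ?_ _ _ hs''
  intro s3 tup hs3
  by_cases h : PySem.List.pyGet? tup 0 = some 0
  · simpa [h] using hs3
  · simpa [h] using PySem.Set.nodup_add s3 _ hs3

-- ===== VERDICT (by name: the statement is the Claim_ definition above) =====
theorem generate_duodigits_upto_spec : Claim_equal_generate_duodigits_upto := by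
  intro m _
  unfold Spec_generate_duodigits_upto generate_duodigits_upto generate_duodigits_upto_alt
  rw [araw_eq m]
  rw [PySem.List.sorted_id_eq_sorted_id_iff_perm]
  refine (List.perm_ext_iff_of_nodup (nodup_map_dlists m) (nodup_seen m)).mpr ?_
  intro n
  rw [mem_map_dlists, mem_seen]
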